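-- pv_equiv track=rewrite | github.com/adi271001/gfg-weekly-solutions | Week-91/Save-Civilians.py | saveCivilians
-- ===== SOURCE A (Python) =====
-- def saveCivilians(n, m, grid):
--     # code here
--     civilians = [(i, j) for i in range(n) for j in range(m) if grid[i][j] == 'C']
--     if not civilians:
--         return True
--     for i, j in civilians:
--         for x, y in [(i-1, j), (i, j-1), (i+1, j), (i, j+1)]:
--             if 0 <= x < n and 0 <= y < m and grid[x][y] == 'T':
--                 return False
--     for i, j in civilians:
--         for x, y in [(i-1, j), (i, j-1), (i+1, j), (i, j+1)]:
--             if 0 <= x < n and 0 <= y < m and grid[x][y] == 'E':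
--                 grid[x][y] = 'S'
--     return True
-- ===== SOURCE B (Python) =====
-- def saveCivilians(n, m, grid):
--     # Pair-scan approach: compare horizontally and vertically adjacent cells
--     # in the n x m window; no civilians list, no neighbor-offset bookkeeping.
--     if n <= 0 or m <= 0:
--         return True
--     rows = [row[:m] for row in grid[:n]]
--     for row in rows:
--         for a, b in zip(row, row[1:]):
--             if (a == 'C' and b == 'T') or (a == 'T' and b == 'C'):
--                 return False
--     for r1, r2 in zip(rows, rows[1:]):
--         for a, b in zip(r1, r2):
--             if (a == 'C' and b == 'T') or (a == 'T' and b == 'C'):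
--                 return False
--     # marking pass: escape cells next to a civilian become 'S' (reads the copy,
--     # writes the original grid, so order is irrelevant)
--     for i, row in enumerate(rows):
--         for j in range(len(row) - 1):
--             a, b = row[j], row[j + 1]
--             if a == 'C' and b == 'E':
--                 grid[i][j + 1] = 'S'
--             elif a == 'E' and b == 'C':
--                 grid[i][j] = 'S'
--     for i in range(len(rows) - 1):
--         r1, r2 = rows[i], rows[i + 1]
--         for j in range(len(r2)):
--             a, b = r1[j], r2[j]
--             if a == 'C' and b == 'E':
--                 grid[i + 1][j] = 'S'
--             elif a == 'E' and b == 'C':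
--                 grid[i][j] = 'S'
--     return True
-- ===== Notes on version B (the rewrite author's own statement) =====
-- stated objective: alternative
-- what changed: B never builds a civilians list and never enumerates 4-neighbour offsets: it truncates the grid to its n x m window and scans adjacent PAIRS of cells (zip of each row with its tail, and zip of consecutive rows), rejecting on any {C,T} pair and marking E cells via the same pair scan.
import Mathlib
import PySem

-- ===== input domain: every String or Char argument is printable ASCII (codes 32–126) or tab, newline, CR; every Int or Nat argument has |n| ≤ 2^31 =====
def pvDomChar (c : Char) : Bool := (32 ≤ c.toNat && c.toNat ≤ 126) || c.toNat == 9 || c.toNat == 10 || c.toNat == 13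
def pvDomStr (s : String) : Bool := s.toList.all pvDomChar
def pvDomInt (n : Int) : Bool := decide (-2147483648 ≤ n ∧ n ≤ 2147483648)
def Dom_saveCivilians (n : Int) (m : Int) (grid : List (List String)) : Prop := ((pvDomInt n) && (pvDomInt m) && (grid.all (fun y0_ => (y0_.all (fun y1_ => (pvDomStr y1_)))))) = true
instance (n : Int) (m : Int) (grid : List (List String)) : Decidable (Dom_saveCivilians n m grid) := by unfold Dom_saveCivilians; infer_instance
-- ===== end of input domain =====

-- B replaces A's civilians-list + 4-neighbour-offset scan by a pair scan over the zipped
-- n×m window; equivalence here is about the RETURN value — both programs also perform the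
-- same E→'S' in-place marking of the grid.

-- grid[x][y] (A only reads in-range cells; Pre_ guarantees the reads succeed)
def pvCell (grid : List (List String)) (x y : Int) : String :=
  (PySem.List.pyGet? ((PySem.List.pyGet? grid x).getD []) y).getD ""

-- the four orthogonal neighbours [(x-1,y),(x,y-1),(x+1,y),(x,y+1)]
def pvNbrs (x y : Int) : List (Int × Int) :=
  [(x - 1, y), (x, y - 1), (x + 1, y), (x, y + 1)]

-- ===== PORT A =====
def saveCivilians (n : Int) (m : Int) (grid : List (List String)) : Bool :=
  let civilians : List (Int × Int) :=
    (PySem.List.pyRange 0 n 1).flatMap (fun i =>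
      ((PySem.List.pyRange 0 m 1).filter (fun j => pvCell grid i j == "C")).map (fun j => (i, j)))
  if civilians.isEmpty then true
  else if civilians.any (fun p =>
      (pvNbrs p.1 p.2).any (fun q =>
        decide (0 ≤ q.1 ∧ q.1 < n ∧ 0 ≤ q.2 ∧ q.2 < m) && pvCell grid q.1 q.2 == "T"))
  then false
  else
    -- A's final loop only mutates grid (E→S); it does not affect the return value
    true

-- ===== PORT B =====
-- a {C,T} pair, in either orientation
def pvPairCT (a b : String) : Bool := (a == "C" && b == "T") || (a == "T" && b == "C")

def saveCivilians_alt (n : Int) (m : Int) (grid : List (List String)) : Bool :=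
  if n ≤ 0 || m ≤ 0 then true
  else
    let rows := (PySem.List.slice grid none (some n)).map
      (fun row => PySem.List.slice row none (some m))
    if rows.any (fun row =>
        (row.zip (PySem.List.slice row (some 1) none)).any (fun p => pvPairCT p.1 p.2))
    then false
    else if (rows.zip (PySem.List.slice rows (some 1) none)).any (fun p =>
        (p.1.zip p.2).any (fun q => pvPairCT q.1 q.2))
    then false
    else
      -- B's marking pass only mutates grid (E→S); it does not affect the return value
      true

-- ===== PRECONDITION & SPEC =====
-- Pre_ excludes exactly the inputs on which Python A raises IndexError: with n,m > 0 it reads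
-- grid[i][j] for every 0 ≤ i < n, 0 ≤ j < m, so the grid must have at least n rows of length ≥ m.
def Pre_saveCivilians (n : Int) (m : Int) (grid : List (List String)) : Prop :=
  0 < n → 0 < m → (n ≤ (grid.length : Int) ∧ ∀ row ∈ grid.take n.toNat, m ≤ (row.length : Int))
instance (n : Int) (m : Int) (grid : List (List String)) : Decidable (Pre_saveCivilians n m grid) := by
  unfold Pre_saveCivilians; infer_instance
def pvWitness_saveCivilians : Int × Int × List (List String) :=
  (2, 2, [["C", "E"], ["E", "."]])
def Spec_saveCivilians (n : Int) (m : Int) (grid : List (List String)) (out : Bool) : Prop := out = saveCivilians_alt n m grid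
instance (n : Int) (m : Int) (grid : List (List String)) (out : Bool) : Decidable (Spec_saveCivilians n m grid out) := by unfold Spec_saveCivilians; infer_instance

-- ===== CLAIM (what is proved, stated in full; the proofs are below) =====
def Claim_equal_saveCivilians : Prop := ∀ (n : Int) (m : Int) (grid : List (List String)), Dom_saveCivilians n m grid → Pre_saveCivilians n m grid → Spec_saveCivilians n m grid (saveCivilians n m grid)

-- ===== LEMMAS AND PROOFS =====

-- the dangerous configuration, as a proposition
def pvDanger (n m : Int) (grid : List (List String)) : Prop :=
  ∃ i j x y : Int, 0 ≤ i ∧ i < n ∧ 0 ≤ j ∧ j < m ∧ pvCell grid i j = "C" ∧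
    (x, y) ∈ pvNbrs i j ∧ 0 ≤ x ∧ x < n ∧ 0 ≤ y ∧ y < m ∧ pvCell grid x y = "T"

lemma mem_pvNbrs (x y i j : Int) :
    (x, y) ∈ pvNbrs i j ↔
      ((x = i - 1 ∧ y = j) ∨ (x = i ∧ y = j - 1) ∨ (x = i + 1 ∧ y = j) ∨ (x = i ∧ y = j + 1)) := by
  simp [pvNbrs, Prod.ext_iff]

lemma saveCivilians_false_iff (n m : Int) (grid : List (List String)) :
    saveCivilians n m grid = false ↔ pvDanger n m grid := by
  unfold saveCivilians
  set civ := (PySem.List.pyRange 0 n 1).flatMap (fun i =>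
      ((PySem.List.pyRange 0 m 1).filter (fun j => pvCell grid i j == "C")).map (fun j => (i, j)))
    with hciv
  have hany : (civ.any (fun p =>
      (pvNbrs p.1 p.2).any (fun q =>
        decide (0 ≤ q.1 ∧ q.1 < n ∧ 0 ≤ q.2 ∧ q.2 < m) && pvCell grid q.1 q.2 == "T")))
      = true ↔ pvDanger n m grid := by
    simp only [pvDanger]
    rw [List.any_eq_true]
    constructor
    · rintro ⟨⟨i, j⟩, hmem, hq⟩
      rw [hciv] at hmem
      simp only [List.mem_flatMap, List.mem_map, List.mem_filter,
        PySem.List.mem_pyRange_one, beq_iff_eq] at hmem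
      obtain ⟨i', hi', j', ⟨⟨hj', hC⟩, hpair⟩⟩ := hmem
      rw [Prod.mk.injEq] at hpair
      obtain ⟨rfl, rfl⟩ := hpair
      rw [List.any_eq_true] at hq
      obtain ⟨⟨x, y⟩, hqmem, hT⟩ := hq
      simp only [Bool.and_eq_true, decide_eq_true_eq, beq_iff_eq] at hT
      exact ⟨i', j', x, y, hi'.1, hi'.2, hj'.1, hj'.2, hC, hqmem, hT.1.1, hT.1.2.1,
        hT.1.2.2.1, hT.1.2.2.2, hT.2⟩
    · rintro ⟨i, j, x, y, h0i, hin, h0j, hjm, hC, hnb, h0x, hxn, h0y, hym, hT⟩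
      refine ⟨(i, j), ?_, ?_⟩
      · rw [hciv]
        simp only [List.mem_flatMap, List.mem_map, List.mem_filter,
          PySem.List.mem_pyRange_one, beq_iff_eq]
        exact ⟨i, ⟨h0i, hin⟩, j, ⟨⟨⟨h0j, hjm⟩, hC⟩, rfl⟩⟩
      · rw [List.any_eq_true]
        exact ⟨(x, y), hnb, by simp [h0x, hxn, h0y, hym, hT]⟩
  by_cases hE : civ.isEmpty
  · have h0 : civ = [] := List.isEmpty_iff.mp hE
    rw [h0] at hany
    simp only [List.any_nil, Bool.false_eq_true, false_iff] at hany
    simp [hE, hany]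
  · simp only [hE]
    rcases Bool.eq_false_or_eq_true (civ.any (fun p =>
      (pvNbrs p.1 p.2).any (fun q =>
        decide (0 ≤ q.1 ∧ q.1 < n ∧ 0 ≤ q.2 ∧ q.2 < m) && pvCell grid q.1 q.2 == "T"))) with h | h <;>
      rw [h] at hany ⊢ <;> simp_all

-- pvCell on in-range Nat indices is plain getElem
lemma pvCell_natCast (grid : List (List String)) (i j : Nat) (hi : i < grid.length)
    (hj : j < (grid[i]).length) : pvCell grid (i : Int) (j : Int) = grid[i][j] := by
  simp [pvCell, hi, hj]

-- positional characterisation of zip membership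
lemma mem_zip_iff_getElem {α β : Type} (l₁ : List α) (l₂ : List β) (p : α × β) :
    p ∈ l₁.zip l₂ ↔ ∃ k, ∃ h₁ : k < l₁.length, ∃ h₂ : k < l₂.length, p = (l₁[k], l₂[k]) := by
  rw [List.mem_iff_getElem]
  constructor
  · rintro ⟨k, hk, rfl⟩
    have hk' := hk
    rw [List.length_zip] at hk'
    exact ⟨k, by omega, by omega, by rw [List.getElem_zip]⟩
  · rintro ⟨k, h₁, h₂, rfl⟩
    exact ⟨k, by rw [List.length_zip]; omega, by rw [List.getElem_zip]⟩

lemma saveCivilians_alt_false_iff (n m : Int) (grid : List (List String))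
    (hP : Pre_saveCivilians n m grid) :
    saveCivilians_alt n m grid = false ↔ pvDanger n m grid := by
  unfold saveCivilians_alt
  by_cases h0 : n ≤ 0 ∨ m ≤ 0
  · have hg : (decide (n ≤ 0) || decide (m ≤ 0)) = true := by
      rcases h0 with h | h <;> simp [h]
    rw [if_pos hg]
    simp only [Bool.true_eq_false, false_iff]
    rintro ⟨i, j, x, y, h0i, hin, h0j, hjm, -⟩
    omega
  · push Not at h0
    obtain ⟨hn, hm⟩ := h0
    obtain ⟨hgl, hrl⟩ := hP (by omega) (by omega)
    have hcond : (decide (n ≤ 0) || decide (m ≤ 0)) = false := by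
      simp; omega
    rw [if_neg (by simp [hcond])]
    rw [PySem.List.slice_to grid (by omega)]
    have hsl : (fun row => PySem.List.slice row none (some m)) =
        (fun row : List String => row.take m.toNat) := by
      funext row; exact PySem.List.slice_to row (by omega)
    rw [hsl]
    obtain ⟨N, hNI⟩ : ∃ N : Nat, (N : Int) = n := ⟨n.toNat, Int.toNat_of_nonneg (by omega)⟩
    obtain ⟨M, hMI⟩ : ∃ M : Nat, (M : Int) = m := ⟨m.toNat, Int.toNat_of_nonneg (by omega)⟩
    have hNn : n.toNat = N := by rw [← hNI, Int.toNat_natCast]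
    have hMn : m.toNat = M := by rw [← hMI, Int.toNat_natCast]
    rw [hNn, hMn]
    rw [hNn] at hrl
    set rows := (grid.take N).map (fun row => row.take M) with hrows
    clear_value rows
    have hNg : N ≤ grid.length := by omega
    have hlenr : rows.length = N := by
      simp [hrows]; omega
    have hrowsget : ∀ i (hi : i < N), rows[i]'(by omega) = (grid[i]'(by omega)).take M := by
      intro i hi
      simp [hrows]
    have hMle : ∀ i (hi : i < N), M ≤ (grid[i]'(by omega)).length := by
      intro i hi
      have hmem : grid[i]'(by omega) ∈ grid.take N := by
        have : (grid.take N)[i]'(by simp [List.length_take]; omega) = grid[i]'(by omega) :=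
          List.getElem_take
        rw [← this]
        exact List.getElem_mem _
      have := hrl _ hmem
      omega
    have hrowlen : ∀ i (hi : i < N), (rows[i]'(by omega)).length = M := by
      intro i hi
      rw [hrowsget i hi]
      simp [List.length_take]
      exact hMle i hi
    have hcell : ∀ i j (hi : i < N) (hj : j < M),
        (rows[i]'(by omega))[j]'(by rw [hrowlen i hi]; omega) = pvCell grid (i : Int) (j : Int) := by
      intro i j hi hj
      have hjg : j < (grid[i]'(by omega)).length := by have := hMle i hi; omega
      rw [pvCell_natCast grid i j (by omega) hjg]
      simp [hrowsget i hi, List.getElem_take]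
    set A1 := rows.any (fun row =>
        (row.zip (PySem.List.slice row (some 1) none)).any fun p => pvPairCT p.1 p.2) with hA1def
    set A2 := (rows.zip (PySem.List.slice rows (some 1) none)).any (fun p =>
        (p.1.zip p.2).any fun q => pvPairCT q.1 q.2) with hA2def
    have hshape : (if A1 = true then false else if A2 = true then false else true) = !(A1 || A2) := by
      cases A1 <;> cases A2 <;> simp
    rw [hshape]
    rw [show ((!(A1 || A2)) = false ↔ pvDanger n m grid) ↔
        ((A1 = true ∨ A2 = true) ↔ pvDanger n m grid) by
      cases A1 <;> cases A2 <;> simp]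
    -- horizontal pairs
    have hH : A1 = true ↔ ∃ i k : Nat, i < N ∧ k + 1 < M ∧
        pvPairCT (pvCell grid i k) (pvCell grid i (k + 1)) = true := by
      rw [hA1def, List.any_eq_true]
      constructor
      · rintro ⟨row, hmem, hp⟩
        rw [List.mem_iff_getElem] at hmem
        obtain ⟨i, hi, rfl⟩ := hmem
        have hiN : i < N := by omega
        rw [List.any_eq_true] at hp
        obtain ⟨⟨a, b⟩, hz, hct⟩ := hp
        rw [PySem.List.slice_from_one, mem_zip_iff_getElem] at hz
        obtain ⟨k, h₁, h₂, heq⟩ := hz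
        rw [List.length_tail] at h₂
        rw [Prod.mk.injEq] at heq
        obtain ⟨ha, hb⟩ := heq
        have hk1 : k + 1 < M := by have := hrowlen i hiN; omega
        refine ⟨i, k, hiN, hk1, ?_⟩
        have hc1 := hcell i k hiN (by omega)
        have hc2 := hcell i (k + 1) hiN hk1
        push_cast at hc2
        rw [← hc1, ← hc2]
        dsimp only at hct ha hb
        rw [ha, hb] at hct
        simpa [List.getElem_tail] using hct
      · rintro ⟨i, k, hi, hk1, hct⟩
        refine ⟨rows[i]'(by omega), List.getElem_mem _, ?_⟩
        rw [List.any_eq_true]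
        refine ⟨(pvCell grid i k, pvCell grid i (k + 1)), ?_, hct⟩
        rw [PySem.List.slice_from_one, mem_zip_iff_getElem]
        refine ⟨k, by rw [hrowlen i hi]; omega, by rw [List.length_tail, hrowlen i hi]; omega, ?_⟩
        have hc2 := hcell i (k + 1) hi hk1
        push_cast at hc2
        rw [List.getElem_tail, hcell i k hi (by omega), hc2]
    -- vertical pairs
    have hV : A2 = true ↔ ∃ i j : Nat, i + 1 < N ∧ j < M ∧
        pvPairCT (pvCell grid i j) (pvCell grid (i + 1) j) = true := by
      rw [hA2def, List.any_eq_true]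
      constructor
      · rintro ⟨⟨r1, r2⟩, hz, hp⟩
        rw [PySem.List.slice_from_one, mem_zip_iff_getElem] at hz
        obtain ⟨i, h₁, h₂, heq⟩ := hz
        rw [List.length_tail] at h₂
        rw [Prod.mk.injEq] at heq
        obtain ⟨h1, h2⟩ := heq
        have hi1 : i + 1 < N := by omega
        rw [List.any_eq_true] at hp
        obtain ⟨⟨a, b⟩, hzz, hct⟩ := hp
        rw [mem_zip_iff_getElem] at hzz
        obtain ⟨j, hj₁, hj₂, heq2⟩ := hzz
        rw [Prod.mk.injEq] at heq2
        obtain ⟨ha, hb⟩ := heq2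
        subst h1 h2
        have hjM : j < M := by rw [← hrowlen i (by omega)]; exact hj₁
        refine ⟨i, j, hi1, hjM, ?_⟩
        have hc2 := hcell (i + 1) j hi1 hjM
        push_cast at hc2
        rw [← hcell i j (by omega) hjM, ← hc2]
        dsimp only at hct ha hb
        rw [ha, hb] at hct
        simpa [List.getElem_tail] using hct
      · rintro ⟨i, j, hi1, hj, hct⟩
        refine ⟨(rows[i]'(by omega), rows[i + 1]'(by omega)), ?_, ?_⟩
        · rw [PySem.List.slice_from_one, mem_zip_iff_getElem]
          exact ⟨i, by omega, by rw [List.length_tail]; omega, by rw [List.getElem_tail]⟩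
        · rw [List.any_eq_true]
          refine ⟨(pvCell grid i j, pvCell grid (i + 1) j), ?_, hct⟩
          rw [mem_zip_iff_getElem]
          refine ⟨j, by rw [hrowlen i (by omega)]; omega, by rw [hrowlen (i + 1) hi1]; omega, ?_⟩
          have hc2 := hcell (i + 1) j hi1 hj
          push_cast at hc2
          rw [hcell i j (by omega) hj, hc2]
    rw [hH, hV]
    clear hH hV hA1def hA2def hshape hsl hcond
    constructor
    · rintro (⟨i, k, hi, hk1, hct⟩ | ⟨i, j, hi1, hj, hct⟩)
      · simp only [pvPairCT, Bool.or_eq_true, Bool.and_eq_true, beq_iff_eq] at hct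
        rcases hct with ⟨hC, hT⟩ | ⟨hT, hC⟩
        · refine ⟨(i : Int), (k : Int), (i : Int), (k : Int) + 1,
            by omega, by omega, by omega, by omega, hC, ?_,
            by omega, by omega, by omega, by omega, hT⟩
          rw [mem_pvNbrs]
          omega
        · refine ⟨(i : Int), (k : Int) + 1, (i : Int), (k : Int),
            by omega, by omega, by omega, by omega, hC, ?_,
            by omega, by omega, by omega, by omega, hT⟩
          rw [mem_pvNbrs]
          omega
      · simp only [pvPairCT, Bool.or_eq_true, Bool.and_eq_true, beq_iff_eq] at hct
        rcases hct with ⟨hC, hT⟩ | ⟨hT, hC⟩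
        · refine ⟨(i : Int), (j : Int), (i : Int) + 1, (j : Int),
            by omega, by omega, by omega, by omega, hC, ?_,
            by omega, by omega, by omega, by omega, hT⟩
          rw [mem_pvNbrs]
          omega
        · refine ⟨(i : Int) + 1, (j : Int), (i : Int), (j : Int),
            by omega, by omega, by omega, by omega, hC, ?_,
            by omega, by omega, by omega, by omega, hT⟩
          rw [mem_pvNbrs]
          omega
    · rintro ⟨i, j, x, y, h0i, hin, h0j, hjm, hC, hnb, h0x, hxn, h0y, hym, hT⟩
      simp only [pvNbrs, List.mem_cons, List.not_mem_nil, or_false, Prod.mk.injEq] at hnb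
      rcases hnb with ⟨hx, hy⟩ | ⟨hx, hy⟩ | ⟨hx, hy⟩ | ⟨hx, hy⟩
      · -- tank at (i-1, j): vertical pair (x, x+1=i) at column j
        right
        refine ⟨x.toNat, j.toNat, by omega, by omega, ?_⟩
        have e1 : ((x.toNat : Nat) : Int) = x := by omega
        have e2 : ((j.toNat : Nat) : Int) = j := by omega
        have e3 : ((x.toNat : Nat) : Int) + 1 = i := by omega
        simp only [pvPairCT, Bool.or_eq_true, Bool.and_eq_true, beq_iff_eq]
        right
        constructor
        · rw [e1, e2, ← hy]; exact hT
        · rw [e3, e2]; exact hC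
      · -- tank at (i, j-1): horizontal pair (y, y+1=j) in row i
        left
        refine ⟨i.toNat, y.toNat, by omega, by omega, ?_⟩
        have e1 : ((i.toNat : Nat) : Int) = i := by omega
        have e2 : ((y.toNat : Nat) : Int) = y := by omega
        have e3 : ((y.toNat : Nat) : Int) + 1 = j := by omega
        simp only [pvPairCT, Bool.or_eq_true, Bool.and_eq_true, beq_iff_eq]
        right
        constructor
        · rw [e1, e2, ← hx]; exact hT
        · rw [e1, e3]; exact hC
      · -- tank at (i+1, j): vertical pair (i, i+1) at column j
        right
        refine ⟨i.toNat, j.toNat, by omega, by omega, ?_⟩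
        have e1 : ((i.toNat : Nat) : Int) = i := by omega
        have e2 : ((j.toNat : Nat) : Int) = j := by omega
        have e3 : ((i.toNat : Nat) : Int) + 1 = x := by omega
        simp only [pvPairCT, Bool.or_eq_true, Bool.and_eq_true, beq_iff_eq]
        left
        constructor
        · rw [e1, e2]; exact hC
        · rw [e3, e2, ← hy]; exact hT
      · -- tank at (i, j+1): horizontal pair (j, j+1) in row i
        left
        refine ⟨i.toNat, j.toNat, by omega, by omega, ?_⟩
        have e1 : ((i.toNat : Nat) : Int) = i := by omega
        have e2 : ((j.toNat : Nat) : Int) = j := by omega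
        have e3 : ((j.toNat : Nat) : Int) + 1 = y := by omega
        simp only [pvPairCT, Bool.or_eq_true, Bool.and_eq_true, beq_iff_eq]
        left
        constructor
        · rw [e1, e2]; exact hC
        · rw [e1, e3, ← hx]; exact hT

-- ===== VERDICT (by name: the statement is the Claim_ definition above) =====
theorem saveCivilians_spec : Claim_equal_saveCivilians := by
  intro n m grid _ hP
  unfold Spec_saveCivilians
  have h := (saveCivilians_false_iff n m grid).trans
    (saveCivilians_alt_false_iff n m grid hP).symm
  rcases Bool.eq_false_or_eq_true (saveCivilians n m grid) with hA | hA <;>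
    rcases Bool.eq_false_or_eq_true (saveCivilians_alt n m grid) with hB | hB <;> simp_all
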